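-- pv_equiv track=rewrite | github.com/NatanSkl/FakeNewsRAG | reproduce/visualize_metrics.py | extract_label_info
-- ===== SOURCE A (Python) =====
-- def extract_label_info(filename: str, group_name: str) -> str:
--     """Extract relevant information from filename based on group."""
--     # Remove the _metrics.json suffix
--     name = filename.replace('_metrics.json', '')
--
--     if 'Group1' in group_name:
--         # Extract ce and diversity info
--         # Parse the string to get key=value pairs
--         parts = {}
--         tokens = name.split('_')
--         i = 0
--         while i < len(tokens):
--             if '=' in tokens[i]:
--                 key, value = tokens[i].split('=', 1)
--                 # Check if value continues in next tokens (until we hit another =)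
--                 full_value = value
--                 i += 1
--                 while i < len(tokens) and '=' not in tokens[i]:
--                     full_value += '_' + tokens[i]
--                     i += 1
--                 parts[key] = full_value
--             else:
--                 i += 1
--
--         ce = parts.get('ce', 'None')
--         diversity = parts.get('diversity', 'None')
--         return f"ce={ce}, diversity={diversity}"
--
--     elif 'Group2' in group_name:
--         # Extract prompt and naming info
--         parts = {}
--         tokens = name.split('_')
--         i = 0
--         while i < len(tokens):
--             if '=' in tokens[i]:
--                 key, value = tokens[i].split('=', 1)
--                 # Check if value continues in next tokens (until we hit another =)
--                 full_value = value
--                 i += 1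
--                 while i < len(tokens) and '=' not in tokens[i]:
--                     full_value += '_' + tokens[i]
--                     i += 1
--                 parts[key] = full_value
--             else:
--                 i += 1
--
--         prompt = parts.get('prompt', '?')
--         naming = parts.get('naming', '?')
--         return f"prompt={prompt}, naming={naming}"
--
--     elif 'Group3' in group_name:
--         # For test experiments, show if it's baseline or RAG
--         if 'llm_baseline' in name:
--             return "LLM Baseline"
--         else:
--             # Extract prompt and naming for RAG
--             parts = {}
--             tokens = name.split('_')
--             i = 0
--             while i < len(tokens):
--                 if '=' in tokens[i]:
--                     key, value = tokens[i].split('=', 1)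
--                     full_value = value
--                     i += 1
--                     while i < len(tokens) and '=' not in tokens[i]:
--                         full_value += '_' + tokens[i]
--                         i += 1
--                     parts[key] = full_value
--                 else:
--                     i += 1
--
--             prompt = parts.get('prompt', '?')
--             naming = parts.get('naming', '?')
--             return f"RAG: prompt={prompt}, naming={naming}"
--
--     else:
--         # Default: return full name
--         return name
-- ===== SOURCE B (Python) =====
-- def _parse(name: str) -> dict:
--     """Parse key=value tokens right-to-left in one pass: non-'=' tokens are
--     accumulated as a pending value tail; a token with '=' closes a segment.
--     First hit from the right per key == last-wins of a forward walk."""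
--     parts = {}
--     pending = []
--     for tok in reversed(name.split('_')):
--         if '=' in tok:
--             key, value = tok.split('=', 1)
--             if key not in parts:
--                 parts[key] = '_'.join([value] + pending)
--             pending = []
--         else:
--             pending = [tok] + pending
--     return parts
--
--
-- def extract_label_info(filename: str, group_name: str) -> str:
--     name = filename.replace('_metrics.json', '')
--     if 'Group1' in group_name:
--         p = _parse(name)
--         return f"ce={p.get('ce', 'None')}, diversity={p.get('diversity', 'None')}"
--     elif 'Group2' in group_name:
--         p = _parse(name)
--         return f"prompt={p.get('prompt', '?')}, naming={p.get('naming', '?')}"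
--     elif 'Group3' in group_name:
--         if 'llm_baseline' in name:
--             return "LLM Baseline"
--         p = _parse(name)
--         return f"RAG: prompt={p.get('prompt', '?')}, naming={p.get('naming', '?')}"
--     else:
--         return name
-- ===== Notes on version B (the rewrite author's own statement) =====
-- stated objective: alternative
-- what changed: A's per-group copy of a two-level forward while-loop (outer index walk plus inner value-continuation walk, last key wins by dict overwrite) is replaced by a single reverse fold over the token list with a pending-tail accumulator and first-occurrence-from-the-right insertion.
import Mathlib
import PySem

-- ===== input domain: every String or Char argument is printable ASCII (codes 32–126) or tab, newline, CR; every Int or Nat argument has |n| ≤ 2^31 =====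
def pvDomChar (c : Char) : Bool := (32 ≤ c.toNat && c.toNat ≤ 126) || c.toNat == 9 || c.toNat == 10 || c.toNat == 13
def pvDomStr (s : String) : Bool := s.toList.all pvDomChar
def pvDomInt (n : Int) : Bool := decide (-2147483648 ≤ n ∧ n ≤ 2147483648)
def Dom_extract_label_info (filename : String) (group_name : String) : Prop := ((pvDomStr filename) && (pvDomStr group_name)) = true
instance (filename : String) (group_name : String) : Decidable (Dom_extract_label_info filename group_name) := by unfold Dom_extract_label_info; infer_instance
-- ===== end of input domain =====

-- B replaces A's forward two-level while-loop key=value walk by a single reverse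
-- fold with a pending-tail accumulator (alternative decomposition, same cost).

-- ===== PORT A =====

-- shared port of the Python line  «'=' in tok»  (both sources contain it verbatim)
def pvHasEq (t : List Char) : Bool := PySem.Chars.isIn ['='] t

-- shared port of the Python line  «key, value = tok.split('=', 1)»  (both sources
-- contain it verbatim); the fallback arm is unreachable when '=' occurs in t
def pvKV (t : List Char) : List Char × List Char :=
  match PySem.Chars.splitOnMax t ['='] 1 with
  | k :: v :: _ => (k, v)
  | _ => (t, [])

-- A's inner while loop: «while i < len(tokens) and '=' not in tokens[i]: full_value += '_' + tokens[i]»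
def pvCollectA (full : List Char) (ts : List (List Char)) : List Char × List (List Char) :=
  match ts with
  | [] => (full, [])
  | t :: rest => if pvHasEq t then (full, t :: rest) else pvCollectA (full ++ '_' :: t) rest

theorem pvCollectA_len (full : List Char) (ts : List (List Char)) :
    (pvCollectA full ts).2.length ≤ ts.length := by
  induction ts generalizing full with
  | nil => simp [pvCollectA]
  | cons t rest ih =>
    simp only [pvCollectA]
    split
    · simp
    · exact Nat.le_succ_of_le (ih _)

-- A's outer while loop over the token list (the parse block A repeats in each branch)
def pvParseA : PySem.Dict (List Char) (List Char) → List (List Char) →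
    PySem.Dict (List Char) (List Char)
  | parts, [] => parts
  | parts, t :: rest =>
    if pvHasEq t then
      pvParseA (parts.insert (pvKV t).1 (pvCollectA (pvKV t).2 rest).1) (pvCollectA (pvKV t).2 rest).2
    else
      pvParseA parts rest
termination_by _ ts => ts.length
decreasing_by
  · exact Nat.lt_succ_of_le (pvCollectA_len _ _)
  · simp

def extract_label_info (filename : String) (group_name : String) : String :=
  let name : List Char := (PySem.Str.replace filename "_metrics.json" "").toList
  if PySem.Chars.isIn "Group1".toList group_name.toList then
    let parts := pvParseA PySem.Dict.empty (PySem.Chars.splitOn name ['_'])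
    String.ofList ("ce=".toList ++ parts.getD "ce".toList "None".toList
      ++ ", diversity=".toList ++ parts.getD "diversity".toList "None".toList)
  else if PySem.Chars.isIn "Group2".toList group_name.toList then
    let parts := pvParseA PySem.Dict.empty (PySem.Chars.splitOn name ['_'])
    String.ofList ("prompt=".toList ++ parts.getD "prompt".toList "?".toList
      ++ ", naming=".toList ++ parts.getD "naming".toList "?".toList)
  else if PySem.Chars.isIn "Group3".toList group_name.toList then
    if PySem.Chars.isIn "llm_baseline".toList name then "LLM Baseline"
    else
      let parts := pvParseA PySem.Dict.empty (PySem.Chars.splitOn name ['_'])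
      String.ofList ("RAG: prompt=".toList ++ parts.getD "prompt".toList "?".toList
        ++ ", naming=".toList ++ parts.getD "naming".toList "?".toList)
  else String.ofList name

-- ===== PORT B =====

-- loop body of B's single reverse pass (_parse's for-loop over reversed(tokens))
def pvStepB (st : PySem.Dict (List Char) (List Char) × List (List Char)) (tok : List Char) :
    PySem.Dict (List Char) (List Char) × List (List Char) :=
  if pvHasEq tok then
    (if st.1.contains (pvKV tok).1 then st.1
     else st.1.insert (pvKV tok).1 (PySem.Chars.join ['_'] ((pvKV tok).2 :: st.2)), [])
  else (st.1, tok :: st.2)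

-- B's _parse: one fold over the reversed token list
def pvParseB (tokens : List (List Char)) : PySem.Dict (List Char) (List Char) :=
  (tokens.reverse.foldl pvStepB (PySem.Dict.empty, [])).1

def extract_label_info_alt (filename : String) (group_name : String) : String :=
  let name : List Char := (PySem.Str.replace filename "_metrics.json" "").toList
  if PySem.Chars.isIn "Group1".toList group_name.toList then
    let p := pvParseB (PySem.Chars.splitOn name ['_'])
    String.ofList ("ce=".toList ++ p.getD "ce".toList "None".toList
      ++ ", diversity=".toList ++ p.getD "diversity".toList "None".toList)
  else if PySem.Chars.isIn "Group2".toList group_name.toList then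
    let p := pvParseB (PySem.Chars.splitOn name ['_'])
    String.ofList ("prompt=".toList ++ p.getD "prompt".toList "?".toList
      ++ ", naming=".toList ++ p.getD "naming".toList "?".toList)
  else if PySem.Chars.isIn "Group3".toList group_name.toList then
    if PySem.Chars.isIn "llm_baseline".toList name then "LLM Baseline"
    else
      let p := pvParseB (PySem.Chars.splitOn name ['_'])
      String.ofList ("RAG: prompt=".toList ++ p.getD "prompt".toList "?".toList
        ++ ", naming=".toList ++ p.getD "naming".toList "?".toList)
  else String.ofList name

-- ===== PRECONDITION & SPEC =====
def Spec_extract_label_info (filename : String) (group_name : String) (out : String) : Prop := out = extract_label_info_alt filename group_name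
instance (filename : String) (group_name : String) (out : String) : Decidable (Spec_extract_label_info filename group_name out) := by unfold Spec_extract_label_info; infer_instance

-- ===== CLAIM (what is proved, stated in full; the proofs are below) =====
def Claim_equal_extract_label_info : Prop := ∀ (filename : String) (group_name : String), Dom_extract_label_info filename group_name → Spec_extract_label_info filename group_name (extract_label_info filename group_name)

-- ===== LEMMAS AND PROOFS =====

-- the list of (key, full-underscore-joined value) segments, in token order
def pvSegs : List (List Char) → List (List Char × List Char)
  | [] => []
  | t :: rest =>
    if pvHasEq t then
      ((pvKV t).1, (rest.takeWhile (fun u => !pvHasEq u)).foldl (fun a u => a ++ '_' :: u) (pvKV t).2)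
        :: pvSegs (rest.dropWhile (fun u => !pvHasEq u))
    else pvSegs rest
termination_by ts => ts.length
decreasing_by
  · exact Nat.lt_succ_of_le (List.length_dropWhile_le _ _)
  · simp

theorem pvCollectA_eq (ts : List (List Char)) (full : List Char) :
    pvCollectA full ts =
      ((ts.takeWhile (fun u => !pvHasEq u)).foldl (fun a u => a ++ '_' :: u) full,
       ts.dropWhile (fun u => !pvHasEq u)) := by
  induction ts generalizing full with
  | nil => simp [pvCollectA]
  | cons t rest ih =>
    by_cases h : pvHasEq t
    · simp [pvCollectA, h, List.takeWhile_cons_of_neg, List.dropWhile_cons_of_neg]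
    · simp [pvCollectA, h, List.takeWhile_cons_of_pos, List.dropWhile_cons_of_pos, ih]

theorem pvSegs_dropWhile (ts : List (List Char)) :
    pvSegs (ts.dropWhile (fun u => !pvHasEq u)) = pvSegs ts := by
  induction ts with
  | nil => simp
  | cons t rest ih =>
    by_cases h : pvHasEq t
    · rw [List.dropWhile_cons_of_neg (by simp [h])]
    · rw [List.dropWhile_cons_of_pos (by simp [h])]
      rw [ih]
      rw [pvSegs]
      simp [h]

theorem pvParseA_eq (ts : List (List Char)) (parts : PySem.Dict (List Char) (List Char)) :
    pvParseA parts ts = (pvSegs ts).foldl (fun d s => d.insert s.1 s.2) parts := by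
  induction hts : ts.length using Nat.strong_induction_on generalizing ts parts with
  | _ n ih =>
    match ts with
    | [] => simp [pvParseA, pvSegs]
    | t :: rest =>
      by_cases h : pvHasEq t
      · rw [pvParseA, if_pos h, pvSegs, if_pos h, pvCollectA_eq]
        simp only [List.foldl_cons]
        subst hts
        exact ih _ (Nat.lt_succ_of_le (List.length_dropWhile_le _ _)) _ _ rfl
      · rw [pvParseA, if_neg h, pvSegs, if_neg h]
        subst hts
        exact ih rest.length (Nat.lt_succ_self _) _ _ rfl

theorem pvGet?_foldl_insert (l : List (List Char × List Char))
    (d : PySem.Dict (List Char) (List Char)) (k : List Char) :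
    (l.foldl (fun d s => d.insert s.1 s.2) d).get? k =
      ((l.reverse.find? (fun s => s.1 == k)).map Prod.snd).or (d.get? k) := by
  induction l generalizing d with
  | nil => simp
  | cons s l ih =>
    simp only [List.foldl_cons, List.reverse_cons, List.find?_append]
    rw [ih]
    cases hf : l.reverse.find? (fun s => s.1 == k) with
    | some v => simp
    | none =>
      simp only [Option.none_or, Option.map_none]
      rw [PySem.Dict.get?_insert]
      by_cases hk : k = s.1
      · simp [List.find?, hk]
      · have hb : (s.1 == k) = false := by simp [Ne.symm hk]
        simp [List.find?, hk, hb]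

theorem pvFoldlUnderscore_append (l : List (List Char)) (a b : List Char) :
    l.foldl (fun a u => a ++ '_' :: u) (a ++ b) = a ++ l.foldl (fun a u => a ++ '_' :: u) b := by
  induction l generalizing b with
  | nil => simp
  | cons x l ih =>
    simp only [List.foldl_cons]
    rw [List.append_assoc]
    exact ih _

theorem pvJoin_foldl (l : List (List Char)) (v : List Char) :
    PySem.Chars.join ['_'] (v :: l) = l.foldl (fun a u => a ++ '_' :: u) v := by
  induction l generalizing v with
  | nil => simp [PySem.Chars.join, List.intercalate]
  | cons x l ih =>
    rw [PySem.Chars.join_cons_cons, ih x]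
    simp only [List.foldl_cons]
    rw [show v ++ '_' :: x = (v ++ ['_']) ++ x by simp,
      pvFoldlUnderscore_append l (v ++ ['_']) x]

theorem pvStepB_invariant (ts : List (List Char)) :
    (ts.foldr (fun tok st => pvStepB st tok) (PySem.Dict.empty, [])).2
        = ts.takeWhile (fun u => !pvHasEq u) ∧
      ∀ k, (ts.foldr (fun tok st => pvStepB st tok) (PySem.Dict.empty, [])).1.get? k
        = ((pvSegs ts).reverse.find? (fun s => s.1 == k)).map Prod.snd := by
  induction ts with
  | nil => simp [pvSegs]
  | cons t rest ih =>
    obtain ⟨ih2, ih1⟩ := ih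
    simp only [List.foldr_cons]
    by_cases h : pvHasEq t
    · rw [pvStepB, if_pos h]
      refine ⟨by rw [List.takeWhile_cons_of_neg (by simp [h])], ?_⟩
      intro k
      rw [pvSegs, if_pos h, pvSegs_dropWhile rest]
      simp only [List.reverse_cons, List.find?_append]
      rw [ih2, ← pvJoin_foldl]
      by_cases hc : (rest.foldr (fun tok st => pvStepB st tok) (PySem.Dict.empty, [])).1.contains (pvKV t).1
      · rw [if_pos hc, ih1]
        rw [PySem.Dict.contains_eq_isSome_get?, ih1] at hc
        cases hf : (pvSegs rest).reverse.find? (fun s => s.1 == k) with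
        | some v => simp
        | none =>
          simp only [Option.map_none, Option.none_or]
          by_cases hk : k = (pvKV t).1
          · exfalso; rw [hk] at hf; rw [hf] at hc; simp at hc
          · have hb : ((pvKV t).1 == k) = false := by simp [Ne.symm hk]
            simp [List.find?, hb]
      · rw [if_neg hc, PySem.Dict.get?_insert, ih1]
        rw [PySem.Dict.contains_eq_isSome_get?, ih1] at hc
        cases hf : (pvSegs rest).reverse.find? (fun s => s.1 == k) with
        | some v =>
          have hk : ¬ k = (pvKV t).1 := by
            intro hk; rw [hk] at hf; rw [hf] at hc; simp at hc
          rw [if_neg hk]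
          simp
        | none =>
          simp only [Option.map_none, Option.none_or]
          by_cases hk : k = (pvKV t).1
          · have hb : ((pvKV t).1 == k) = true := by simp [hk]
            simp [List.find?, hk]
          · have hb : ((pvKV t).1 == k) = false := by simp [Ne.symm hk]
            simp [List.find?, hb, if_neg hk]
    · rw [pvStepB, if_neg h]
      refine ⟨?_, ?_⟩
      · rw [List.takeWhile_cons_of_pos (by simp [h])]
        simpa using ih2
      · intro k
        rw [pvSegs, if_neg h]
        exact ih1 k

theorem pvParse_get?_eq (ts : List (List Char)) (k : List Char) :
    (pvParseB ts).get? k = (pvParseA PySem.Dict.empty ts).get? k := by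
  rw [pvParseB, List.foldl_reverse]
  rw [(pvStepB_invariant ts).2 k]
  rw [pvParseA_eq, pvGet?_foldl_insert]
  simp

theorem pvParse_getD_eq (ts : List (List Char)) (k dflt : List Char) :
    (pvParseA PySem.Dict.empty ts).getD k dflt = (pvParseB ts).getD k dflt := by
  rw [PySem.Dict.getD_eq_get?_getD, PySem.Dict.getD_eq_get?_getD, pvParse_get?_eq]

-- ===== VERDICT (by name: the statement is the Claim_ definition above) =====
theorem extract_label_info_spec : Claim_equal_extract_label_info := by
  intro filename group_name _
  unfold Spec_extract_label_info extract_label_info extract_label_info_alt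
  simp only [pvParse_getD_eq]
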